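-- pv_equiv track=rewrite | github.com/alexanderwilly/GomokuAgent | MarkV.py | _nearby_moves
-- ===== SOURCE A (Python) =====
-- from typing import List, Tuple, Optional, Iterable
--
-- Coord = Tuple[int, int]
--
-- def _nearby_moves(board: List[List[str]], legal: Iterable[Coord], radius: int = 2) -> List[Coord]:
--     size = len(board)
--     occupied = [(r, c) for r in range(size) for c in range(size) if board[r][c] != '.']
--     if not occupied:
--         return list(legal)
--     def is_close(rc: Coord) -> bool:
--         r, c = rc
--         for rr, cc in occupied:
--             if abs(rr - r) <= radius and abs(cc - c) <= radius:
--                 return True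
--         return False
--     return [rc for rc in legal if is_close(rc)]
-- ===== SOURCE B (Python) =====
-- from typing import List, Tuple, Optional, Iterable
--
-- Coord = Tuple[int, int]
--
-- def _nearby_moves(board: List[List[str]], legal: Iterable[Coord], radius: int = 2) -> List[Coord]:
--     size = len(board)
--     occupied = {(r, c) for r in range(size) for c in range(size) if board[r][c] != '.'}
--     if not occupied:
--         return list(legal)
--     out: List[Coord] = []
--     for r, c in legal:
--         lo_r, hi_r = max(0, r - radius), min(size, r + radius + 1)
--         lo_c, hi_c = max(0, c - radius), min(size, c + radius + 1)
--         found = False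
--         for rr in range(lo_r, hi_r):
--             for cc in range(lo_c, hi_c):
--                 if (rr, cc) in occupied:
--                     found = True
--                     break
--             if found:
--                 break
--         if found:
--             out.append((r, c))
--     return out
-- ===== Notes on version B (the rewrite author's own statement) =====
-- stated objective: alternative
-- what changed: Occupied cells go into a set built once; each legal move is tested by scanning its radius window (clamped to the board) with O(1) set lookups, instead of scanning the whole occupied list with abs-distance tests per move; trades per-move cost proportional to the occupied count for a fixed clamped-window scan.
import Mathlib
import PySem

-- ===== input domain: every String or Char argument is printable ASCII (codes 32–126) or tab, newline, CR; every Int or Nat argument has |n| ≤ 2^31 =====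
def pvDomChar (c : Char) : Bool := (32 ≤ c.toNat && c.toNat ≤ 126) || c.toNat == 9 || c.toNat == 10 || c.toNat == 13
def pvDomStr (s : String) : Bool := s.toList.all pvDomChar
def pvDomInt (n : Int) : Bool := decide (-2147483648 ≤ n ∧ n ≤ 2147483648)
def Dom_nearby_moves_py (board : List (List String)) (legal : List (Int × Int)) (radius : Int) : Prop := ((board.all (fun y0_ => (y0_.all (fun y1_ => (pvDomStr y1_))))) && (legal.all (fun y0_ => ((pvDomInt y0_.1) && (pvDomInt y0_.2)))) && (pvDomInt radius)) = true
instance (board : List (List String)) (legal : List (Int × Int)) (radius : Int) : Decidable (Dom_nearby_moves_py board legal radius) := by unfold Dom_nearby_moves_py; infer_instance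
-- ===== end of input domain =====

-- B replaces A's inner scan over all occupied cells by set lookups over the
-- radius window clamped to the board (a different traversal, same result).

-- ===== PORT A =====
-- the list comprehension [(r,c) for r in range(size) for c in range(size) if board[r][c] != '.']
-- (pyGetD is exact here: Pre_ guarantees every index taken is in range)
def pvOccupied (board : List (List String)) : List (Int × Int) :=
  let size : Int := board.length
  (PySem.List.pyRange 0 size 1).flatMap (fun r =>
    ((PySem.List.pyRange 0 size 1).filter (fun c =>
      PySem.List.pyGetD (PySem.List.pyGetD board r []) c "" ≠ ".")).map (fun c => (r, c)))

def nearby_moves_py (board : List (List String)) (legal : List (Int × Int)) (radius : Int) : List (Int × Int) :=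
  let occupied := pvOccupied board
  if occupied = [] then legal
  else
    -- is_close: scan occupied, return True on the first cell within the radius box
    legal.filter (fun rc =>
      occupied.any (fun p => decide (|p.1 - rc.1| ≤ radius) && decide (|p.2 - rc.2| ≤ radius)))

-- ===== PORT B =====
def nearby_moves_py_alt (board : List (List String)) (legal : List (Int × Int)) (radius : Int) : List (Int × Int) :=
  let size : Int := board.length
  -- the set comprehension {(r,c) for r in range(size) for c in range(size) if board[r][c] != '.'}
  let occupied : PySem.Set (Int × Int) := PySem.Set.ofList (pvOccupied board)
  if PySem.Set.len occupied = 0 then legal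
  else
    legal.foldl (fun out rc =>
      let loR := max 0 (rc.1 - radius)
      let hiR := min size (rc.1 + radius + 1)
      let loC := max 0 (rc.2 - radius)
      let hiC := min size (rc.2 + radius + 1)
      let found := (PySem.List.pyRange loR hiR 1).any (fun rr =>
        (PySem.List.pyRange loC hiC 1).any (fun cc => PySem.Set.contains occupied (rr, cc)))
      if found then out ++ [rc] else out) []

-- ===== PRECONDITION & SPEC =====
-- Pre_ excludes exactly the boards with a row shorter than the board itself: there
-- A's comprehension indexes board[r][c] past the row's end and raises IndexError.
def Pre_nearby_moves_py (board : List (List String)) (legal : List (Int × Int)) (radius : Int) : Prop :=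
  ∀ row ∈ board, board.length ≤ row.length
instance (board : List (List String)) (legal : List (Int × Int)) (radius : Int) : Decidable (Pre_nearby_moves_py board legal radius) := by unfold Pre_nearby_moves_py; infer_instance

def pvWitness_nearby_moves_py : List (List String) × (List (Int × Int)) × Int :=
  ([["X", "."], [".", "."]], [(0, 0), (1, 1), (5, 5)], 2)

def Spec_nearby_moves_py (board : List (List String)) (legal : List (Int × Int)) (radius : Int) (out : List (Int × Int)) : Prop := out = nearby_moves_py_alt board legal radius
instance (board : List (List String)) (legal : List (Int × Int)) (radius : Int) (out : List (Int × Int)) : Decidable (Spec_nearby_moves_py board legal radius out) := by unfold Spec_nearby_moves_py; infer_instance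

-- ===== CLAIM (what is proved, stated in full; the proofs are below) =====
def Claim_equal_nearby_moves_py : Prop := ∀ (board : List (List String)) (legal : List (Int × Int)) (radius : Int), Dom_nearby_moves_py board legal radius → Pre_nearby_moves_py board legal radius → Spec_nearby_moves_py board legal radius (nearby_moves_py board legal radius)

-- ===== LEMMAS AND PROOFS =====

-- every occupied cell lies on the board
theorem pvOccupied_bounds (board : List (List String)) (p : Int × Int)
    (hp : p ∈ pvOccupied board) :
    0 ≤ p.1 ∧ p.1 < (board.length : Int) ∧ 0 ≤ p.2 ∧ p.2 < (board.length : Int) := by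
  unfold pvOccupied at hp
  simp only [List.mem_flatMap, List.mem_map, List.mem_filter] at hp
  obtain ⟨r, hr, c, ⟨hc, -⟩, rfl⟩ := hp
  rw [PySem.List.mem_pyRange_one] at hr hc
  exact ⟨hr.1, hr.2, hc.1, hc.2⟩

-- the per-cell tests of A and B agree
theorem pv_close_eq (board : List (List String)) (radius : Int) (rc : Int × Int) :
    (pvOccupied board).any (fun p => decide (|p.1 - rc.1| ≤ radius) && decide (|p.2 - rc.2| ≤ radius)) =
    (PySem.List.pyRange (max 0 (rc.1 - radius)) (min (board.length : Int) (rc.1 + radius + 1)) 1).any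
      (fun rr => (PySem.List.pyRange (max 0 (rc.2 - radius)) (min (board.length : Int) (rc.2 + radius + 1)) 1).any
        (fun cc => PySem.Set.contains (PySem.Set.ofList (pvOccupied board)) (rr, cc))) := by
  simp only [List.any_eq, decide_eq_decide, PySem.Set.contains_eq_listContains,
    List.contains_iff_mem, PySem.Set.mem_ofList, PySem.List.mem_pyRange_one, abs_le,
    Bool.and_eq_true, decide_eq_true_eq]
  constructor
  · rintro ⟨⟨r, c⟩, hp, h1, h2⟩
    have hb := pvOccupied_bounds board (r, c) hp
    exact ⟨r, by simp at hb ⊢; omega, c, by simp at hb ⊢; omega, hp⟩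
  · rintro ⟨rr, hrr, cc, hcc, hp⟩
    exact ⟨(rr, cc), hp, by omega, by omega⟩

theorem nearby_moves_eq (board : List (List String)) (legal : List (Int × Int)) (radius : Int) :
    nearby_moves_py board legal radius = nearby_moves_py_alt board legal radius := by
  unfold nearby_moves_py nearby_moves_py_alt
  by_cases h : pvOccupied board = []
  · simp [h, PySem.Set.len]
  · have hset : ¬ PySem.Set.len (PySem.Set.ofList (pvOccupied board)) = 0 := by
      obtain ⟨p, hp⟩ := List.exists_mem_of_ne_nil _ h
      have hm : p ∈ PySem.Set.ofList (pvOccupied board) := (PySem.Set.mem_ofList _ _).2 hp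
      intro hlen
      simp only [PySem.Set.len, Nat.cast_eq_zero, List.length_eq_zero_iff] at hlen
      simp [hlen] at hm
    simp only [h, hset, if_false]
    rw [PySem.List.foldl_append_if_eq_filter]
    rw [List.nil_append]
    exact List.filter_congr (fun rc _ => pv_close_eq board radius rc)

-- ===== VERDICT (by name: the statement is the Claim_ definition above) =====
theorem nearby_moves_py_spec : Claim_equal_nearby_moves_py := by
  intro board legal radius _ _
  unfold Spec_nearby_moves_py
  exact nearby_moves_eq board legal radius
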